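-- pv_equiv track=rewrite | github.com/fajardofahad/abov3-v1.0.0 | abov3/core/project_integration.py | _parse_code_suggestions
-- ===== SOURCE A (Python) =====
-- from typing import Dict, List, Optional, Any, AsyncIterator, Union
--
-- def _parse_code_suggestions(response: str) -> List[Dict[str, Any]]:
--     """Parse code suggestions from AI response."""
--     # Simple parsing - can be enhanced with more sophisticated parsing
--     suggestions = []
--
--     lines = response.split('\n')
--     current_suggestion = None
--
--     for line in lines:
--         line = line.strip()
--         if line.startswith(('1.', '2.', '3.', '4.', '5.', '-', '*')):
--             if current_suggestion:
--                 suggestions.append(current_suggestion)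
--             current_suggestion = {"text": line, "code": ""}
--         elif current_suggestion and line.startswith('```'):
--             # Start/end of code block
--             continue
--         elif current_suggestion:
--             if line:
--                 current_suggestion["code"] += line + "\n"
--
--     if current_suggestion:
--         suggestions.append(current_suggestion)
--
--     return suggestions
-- ===== SOURCE B (Python) =====
-- from typing import Dict, List, Optional, Any, AsyncIterator, Union
--
-- def _is_header(line):
--     return line.startswith(('1.', '2.', '3.', '4.', '5.', '-', '*'))
--
-- def _segments(lines):
--     """Partition stripped lines into (header, body-lines) segments; lines before
--     the first header are dropped."""
--     segs = []
--     i = 0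
--     n = len(lines)
--     while i < n:
--         if _is_header(lines[i]):
--             body = []
--             j = i + 1
--             while j < n and not _is_header(lines[j]):
--                 body.append(lines[j])
--                 j += 1
--             segs.append((lines[i], body))
--             i = j
--         else:
--             i += 1
--     return segs
--
-- def _parse_code_suggestions(response: str) -> List[Dict[str, Any]]:
--     """Parse code suggestions from AI response (two-pass: segment, then render)."""
--     lines = [l.strip() for l in response.split('\n')]
--     return [{"text": header,
--              "code": "".join(l + "\n" for l in body if l and not l.startswith('```'))}
--             for header, body in _segments(lines)]
-- ===== Notes on version B (the rewrite author's own statement) =====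
-- stated objective: alternative
-- what changed: Replaces A's single loop with a mutable current-suggestion accumulator by a two-pass design: first partition the stripped lines into (header, body) segments, then render each segment's code by a filtered join.
import Mathlib
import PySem

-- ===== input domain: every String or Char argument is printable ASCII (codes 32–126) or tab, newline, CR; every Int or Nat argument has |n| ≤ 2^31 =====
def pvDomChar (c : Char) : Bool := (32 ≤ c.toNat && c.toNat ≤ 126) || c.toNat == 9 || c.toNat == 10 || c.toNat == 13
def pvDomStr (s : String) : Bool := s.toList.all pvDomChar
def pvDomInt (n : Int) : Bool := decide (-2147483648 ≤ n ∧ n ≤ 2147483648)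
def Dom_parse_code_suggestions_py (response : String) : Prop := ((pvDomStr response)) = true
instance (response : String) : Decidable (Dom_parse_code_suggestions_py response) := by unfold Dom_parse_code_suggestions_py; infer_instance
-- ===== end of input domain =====

-- B re-parses by first partitioning the stripped lines into (header, body) segments and then
-- rendering each segment, instead of A's single loop with a mutable current-suggestion accumulator;
-- objective: alternative decomposition, same O(n) cost. (Return value only; neither mutates.)

-- ===== PORT A =====
-- the dict {"text": h, "code": c}; the code string is carried as its character list
def pvMkSug (h : String) (c : List Char) : List (String × String) := [("text", h), ("code", String.ofList c)]

-- one iteration of A's for-loop; state = (suggestions, current_suggestion)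
def pvStepA (st : List (List (String × String)) × Option (String × List Char)) (rawline : String) :
    List (List (String × String)) × Option (String × List Char) :=
  let line := PySem.Str.strip rawline
  if PySem.Str.startswith line "1." || PySem.Str.startswith line "2." || PySem.Str.startswith line "3." ||
     PySem.Str.startswith line "4." || PySem.Str.startswith line "5." || PySem.Str.startswith line "-" ||
     PySem.Str.startswith line "*" then
    (match st.2 with
     | some hc => st.1 ++ [pvMkSug hc.1 hc.2]
     | none => st.1,
     some (line, []))
  else
    match st.2 with
    | none => st
    | some hc =>
      if PySem.Str.startswith line "```" then st
      else if line ≠ "" then (st.1, some (hc.1, hc.2 ++ line.toList ++ ['\n']))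
      else st

def parse_code_suggestions_py (response : String) : List (List (String × String)) :=
  let lines := (PySem.Str.split? response "\n").getD []
  let st := lines.foldl pvStepA ([], none)
  match st.2 with
  | some hc => st.1 ++ [pvMkSug hc.1 hc.2]
  | none => st.1

-- ===== PORT B =====
def pvIsHeader (line : String) : Bool :=
  PySem.Str.startswith line "1." || PySem.Str.startswith line "2." || PySem.Str.startswith line "3." ||
  PySem.Str.startswith line "4." || PySem.Str.startswith line "5." || PySem.Str.startswith line "-" ||
  PySem.Str.startswith line "*"

-- Source B's _segments: at a header, the inner while collects the body (takeWhile) and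
-- resumes at the next header (dropWhile); non-header prefix lines are skipped.
def pvSegments : List String → List (String × List String)
  | [] => []
  | l :: ls =>
    if pvIsHeader l then
      (l, ls.takeWhile (fun x => !pvIsHeader x)) :: pvSegments (ls.dropWhile (fun x => !pvIsHeader x))
    else pvSegments ls
termination_by ls => ls.length
decreasing_by
· exact Nat.lt_succ_of_le (List.length_dropWhile_le _ _)
· exact Nat.lt_succ_of_le (Nat.le_refl _)

def pvKeep (l : String) : Bool := l ≠ "" && !PySem.Str.startswith l "```"

-- render one segment: the '"".join(l + "\n" for l in body if …)' of Source B, on character lists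
def pvRender (seg : String × List String) : List (String × String) :=
  [("text", seg.1), ("code", String.ofList (((seg.2.filter pvKeep).map (fun l => l.toList ++ ['\n'])).flatten))]

def parse_code_suggestions_py_alt (response : String) : List (List (String × String)) :=
  let lines := ((PySem.Str.split? response "\n").getD []).map PySem.Str.strip
  (pvSegments lines).map pvRender

-- ===== PRECONDITION & SPEC =====
def Spec_parse_code_suggestions_py (response : String) (out : List (List (String × String))) : Prop := out = parse_code_suggestions_py_alt response
instance (response : String) (out : List (List (String × String))) : Decidable (Spec_parse_code_suggestions_py response out) := by unfold Spec_parse_code_suggestions_py; infer_instance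

-- ===== CLAIM (what is proved, stated in full; the proofs are below) =====
def Claim_equal_parse_code_suggestions_py : Prop := ∀ (response : String), Dom_parse_code_suggestions_py response → Spec_parse_code_suggestions_py response (parse_code_suggestions_py response)

-- ===== LEMMAS AND PROOFS =====

-- A's loop step on an already-stripped line
def pvStepS (st : List (List (String × String)) × Option (String × List Char)) (line : String) :
    List (List (String × String)) × Option (String × List Char) :=
  if pvIsHeader line then
    (match st.2 with
     | some hc => st.1 ++ [pvMkSug hc.1 hc.2]
     | none => st.1,
     some (line, []))
  else
    match st.2 with
    | none => st
    | some hc =>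
      if PySem.Str.startswith line "```" then st
      else if line ≠ "" then (st.1, some (hc.1, hc.2 ++ line.toList ++ ['\n']))
      else st

-- final flush of A's loop state
def pvFinish (st : List (List (String × String)) × Option (String × List Char)) :
    List (List (String × String)) :=
  match st.2 with
  | some hc => st.1 ++ [pvMkSug hc.1 hc.2]
  | none => st.1

def pvBodyChars (body : List String) : List Char :=
  ((body.filter pvKeep).map (fun l => l.toList ++ ['\n'])).flatten

lemma pvLoop_some (ls : List String) (acc : List (List (String × String))) (h : String) (c : List Char) :
    pvFinish (ls.foldl pvStepS (acc, some (h, c))) =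
      acc ++ [pvMkSug h (c ++ pvBodyChars (ls.takeWhile (fun x => !pvIsHeader x)))]
          ++ (pvSegments (ls.dropWhile (fun x => !pvIsHeader x))).map pvRender := by
  induction ls generalizing acc h c with
  | nil => simp [pvFinish, pvBodyChars, pvSegments]
  | cons l ls ih =>
    by_cases hl : pvIsHeader l = true
    · have hstep : pvStepS (acc, some (h, c)) l = (acc ++ [pvMkSug h c], some (l, [])) := by
        simp [pvStepS, hl]
      rw [List.foldl_cons, hstep, ih]
      simp [hl, pvSegments, pvBodyChars, pvRender, pvMkSug]
    · have hl' : pvIsHeader l = false := by simpa using hl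
      by_cases hb : PySem.Str.startswith l "```" = true
      · have hb2 : PySem.Chars.startswith l.toList ['`', '`', '`'] = true := by simpa using hb
        have hstep : pvStepS (acc, some (h, c)) l = (acc, some (h, c)) := by
          simp [pvStepS, hl', hb2]
        have hkeep : pvKeep l = false := by simp [pvKeep, hb2]
        rw [List.foldl_cons, hstep, ih]
        simp [hl', pvBodyChars, hkeep]
      · have hb2 : PySem.Chars.startswith l.toList ['`', '`', '`'] = false := by
          simpa using hb
        by_cases he : l = ""
        · subst he
          have hstep : pvStepS (acc, some (h, c)) "" = (acc, some (h, c)) := by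
            simp [pvStepS, show pvIsHeader "" = false from by decide]
          have hkeep : pvKeep "" = false := by simp [pvKeep]
          rw [List.foldl_cons, hstep, ih]
          simp [show pvIsHeader "" = false from by decide, pvBodyChars, hkeep]
        · have hstep : pvStepS (acc, some (h, c)) l = (acc, some (h, c ++ l.toList ++ ['\n'])) := by
            simp [pvStepS, hl', hb2, he]
          have hkeep : pvKeep l = true := by simp [pvKeep, he, hb2]
          rw [List.foldl_cons, hstep, ih]
          simp [hl', pvBodyChars, hkeep]

lemma pvLoop_none (ls : List String) (acc : List (List (String × String))) :
    pvFinish (ls.foldl pvStepS (acc, none)) = acc ++ (pvSegments ls).map pvRender := by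
  induction ls generalizing acc with
  | nil => simp [pvFinish, pvSegments]
  | cons l ls ih =>
    by_cases hl : pvIsHeader l = true
    · have hstep : pvStepS (acc, none) l = (acc, some (l, [])) := by simp [pvStepS, hl]
      rw [List.foldl_cons, hstep, pvLoop_some]
      simp [pvSegments, hl, pvRender, pvBodyChars, pvMkSug]
    · have hl' : pvIsHeader l = false := by simpa using hl
      have hstep : pvStepS (acc, none) l = (acc, none) := by simp [pvStepS, hl']
      rw [List.foldl_cons, hstep, ih]
      simp [pvSegments, hl']

-- ===== VERDICT (by name: the statement is the Claim_ definition above) =====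
theorem parse_code_suggestions_py_spec : Claim_equal_parse_code_suggestions_py := by
  intro response _
  unfold Spec_parse_code_suggestions_py parse_code_suggestions_py parse_code_suggestions_py_alt
  have hmap : (((PySem.Str.split? response "\n").getD []).map PySem.Str.strip).foldl pvStepS
      (([] : List (List (String × String))), none)
      = ((PySem.Str.split? response "\n").getD []).foldl pvStepA (([] : List (List (String × String))), none) := by
    rw [List.foldl_map]
    rfl
  have := pvLoop_none (((PySem.Str.split? response "\n").getD []).map PySem.Str.strip) []
  rw [hmap] at this
  simpa [pvFinish] using this
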